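-- pv_equiv track=rewrite | github.com/calico-team/calico-fa22 | tower/solutions/tower_main.py | solve
-- ===== SOURCE A (Python) =====
-- def solve(N: int, P: list[int], D: list[int]) -> int:
--     """
--     Simulates going around the circle, beginning at every tower.
--     This runs in O(N^2) time, only passing the main test set.
--     """
--     bestTime = 10 ** 8
--
--     for start in range(N):
--         totalTime = P[start]
--         for i in range(N - 1):
--             curTower = (start + i) % N
--             totalTime += D[curTower]
--             totalTime = max(totalTime, P[(curTower + 1) % N])
--         bestTime = min(bestTime, totalTime)
--
--     return bestTime
-- ===== SOURCE B (Python) =====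
-- def solve(N: int, P: list[int], D: list[int]) -> int:
--     """
--     O(N) re-implementation: with prefix sums pref over the doubled circle,
--     the time starting at s is pref[s+N-1] + max(Q[s..s+N-1]) where
--     Q[k] = P[k % N] - pref[k]; the window max is read off from suffix maxima
--     of the first copy of Q and prefix maxima of the second copy.
--     """
--     best = 10 ** 8
--     if N <= 0:
--         return best
--     pref = [0]
--     for k in range(1, 2 * N):
--         pref.append(pref[-1] + D[(k - 1) % N])
--     Q = [P[k % N] - pref[k] for k in range(2 * N)]
--     rsmax = [Q[N - 1]]                 # rsmax[t] = max(Q[N-1-t .. N-1])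
--     for i in range(N - 2, -1, -1):
--         rsmax.append(max(Q[i], rsmax[-1]))
--     pmax = [Q[N]]                      # pmax[t] = max(Q[N .. N+t])
--     for j in range(N + 1, 2 * N):
--         pmax.append(max(Q[j], pmax[-1]))
--     for s in range(N):
--         w = rsmax[N - 1 - s] if s == 0 else max(rsmax[N - 1 - s], pmax[s - 1])
--         best = min(best, pref[s + N - 1] + w)
--     return best
-- ===== Notes on version B (the rewrite author's own statement) =====
-- stated objective: faster
-- what changed: A simulates the full circle from every start (nested loops); B computes prefix sums of D over the doubled circle once and reads each start's answer as pref[s+N-1] plus a size-N window maximum of Q[k]=P[k%N]-pref[k], obtained in O(1) per start from precomputed suffix maxima of the first copy and prefix maxima of the second copy, then takes the min.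
import Mathlib
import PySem

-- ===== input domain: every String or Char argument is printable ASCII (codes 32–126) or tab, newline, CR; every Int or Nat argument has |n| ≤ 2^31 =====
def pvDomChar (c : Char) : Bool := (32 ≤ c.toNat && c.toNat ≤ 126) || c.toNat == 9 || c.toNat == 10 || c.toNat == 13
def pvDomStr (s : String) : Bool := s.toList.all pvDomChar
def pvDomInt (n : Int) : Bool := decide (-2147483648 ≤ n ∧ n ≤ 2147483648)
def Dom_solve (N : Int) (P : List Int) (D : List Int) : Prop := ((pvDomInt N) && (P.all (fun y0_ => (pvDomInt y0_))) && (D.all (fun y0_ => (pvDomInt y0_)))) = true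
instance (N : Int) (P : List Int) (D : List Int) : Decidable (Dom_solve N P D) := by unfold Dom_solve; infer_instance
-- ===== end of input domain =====

-- B replaces A's O(N^2) per-start simulation by an O(N) computation: prefix sums of D
-- over the doubled circle plus block-decomposed window maxima; return values proved equal.

-- ===== PORT A =====
def solve (N : Int) (P : List Int) (D : List Int) : Int :=
  let bestTime : Int := 10 ^ 8
  (PySem.List.pyRange 0 N 1).foldl (fun bestTime start =>
    let totalTime : Int := PySem.List.pyGetD P start 0
    let totalTime := (PySem.List.pyRange 0 (N - 1) 1).foldl (fun totalTime i =>
      let curTower := PySem.Int.mod (start + i) N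
      let totalTime := totalTime + PySem.List.pyGetD D curTower 0
      max totalTime (PySem.List.pyGetD P (PySem.Int.mod (curTower + 1) N) 0)) totalTime
    min bestTime totalTime) bestTime

-- ===== PORT B =====
def solve_alt (N : Int) (P : List Int) (D : List Int) : Int :=
  let best : Int := 10 ^ 8
  if N ≤ 0 then best else
  let pref := (PySem.List.pyRange 1 (2 * N) 1).foldl
    (fun pref k => pref ++ [PySem.List.pyGetD pref (-1) 0 + PySem.List.pyGetD D (PySem.Int.mod (k - 1) N) 0]) [(0 : Int)]
  let q := (PySem.List.pyRange 0 (2 * N) 1).map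
    (fun k => PySem.List.pyGetD P (PySem.Int.mod k N) 0 - PySem.List.pyGetD pref k 0)
  let rsmax := (PySem.List.pyRange (N - 2) (-1) (-1)).foldl
    (fun rsmax i => rsmax ++ [max (PySem.List.pyGetD q i 0) (PySem.List.pyGetD rsmax (-1) 0)])
    [PySem.List.pyGetD q (N - 1) 0]
  let pmax := (PySem.List.pyRange (N + 1) (2 * N) 1).foldl
    (fun pmax j => pmax ++ [max (PySem.List.pyGetD q j 0) (PySem.List.pyGetD pmax (-1) 0)])
    [PySem.List.pyGetD q N 0]
  (PySem.List.pyRange 0 N 1).foldl (fun best s =>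
    let w := if s = 0 then PySem.List.pyGetD rsmax (N - 1 - s) 0
      else max (PySem.List.pyGetD rsmax (N - 1 - s) 0) (PySem.List.pyGetD pmax (s - 1) 0)
    min best (PySem.List.pyGetD pref (s + N - 1) 0 + w)) best

-- ===== PRECONDITION & SPEC =====
-- Pre_ excludes exactly the inputs where the Python A raises IndexError: a positive N
-- with fewer than N entries in P or in D (all indices A and B use are < N).
def Pre_solve (N : Int) (P : List Int) (D : List Int) : Prop :=
  0 ≤ N → (N.toNat ≤ P.length ∧ N.toNat ≤ D.length)
instance (N : Int) (P : List Int) (D : List Int) : Decidable (Pre_solve N P D) := by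
  unfold Pre_solve; infer_instance

def pvWitness_solve : Int × List Int × List Int := (3, [5, 2, 4], [1, 1, 1])

def Spec_solve (N : Int) (P : List Int) (D : List Int) (out : Int) : Prop := out = solve_alt N P D
instance (N : Int) (P : List Int) (D : List Int) (out : Int) : Decidable (Spec_solve N P D out) := by unfold Spec_solve; infer_instance

-- ===== CLAIM (what is proved, stated in full; the proofs are below) =====
def Claim_equal_solve : Prop := ∀ (N : Int) (P : List Int) (D : List Int), Dom_solve N P D → Pre_solve N P D → Spec_solve N P D (solve N P D)

-- ===== LEMMAS AND PROOFS =====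

-- prefF D n k = D[0%n] + … + D[(k-1)%n] : prefix sums of D along the doubled circle
def prefF (D : List Int) (n : Nat) : Nat → Int
  | 0 => 0
  | k+1 => prefF D n k + D.getD (k % n) 0

-- qF k = P[k%n] - prefF k ; the start-s answer is prefF (s+n-1) + max of qF over [s, s+n-1]
def qF (P D : List Int) (n k : Nat) : Int := P.getD (k % n) 0 - prefF D n k

-- wmaxF a l = max of qF over the window [a, a+l]
def wmaxF (P D : List Int) (n a : Nat) : Nat → Int
  | 0 => qF P D n a
  | l+1 => max (wmaxF P D n a l) (qF P D n (a+l+1))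

-- rmaxF t = max of qF over [n-1-t, n-1] (B's rsmax entries)
def rmaxF (P D : List Int) (n : Nat) : Nat → Int
  | 0 => qF P D n (n-1)
  | t+1 => max (qF P D n (n-2-t)) (rmaxF P D n t)

-- pmaxF t = max of qF over [n, n+t] (B's pmax entries)
def pmaxF (P D : List Int) (n : Nat) : Nat → Int
  | 0 => qF P D n n
  | t+1 => max (qF P D n (n+1+t)) (pmaxF P D n t)

def ansA (P D : List Int) (n s : Nat) : Int := wmaxF P D n s (n-1) + prefF D n (s+n-1)

def ansB (P D : List Int) (n s : Nat) : Int :=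
  prefF D n (s+n-1) +
    (if s = 0 then rmaxF P D n (n-1) else max (rmaxF P D n (n-1-s)) (pmaxF P D n (s-1)))

lemma wmax_cons (P D : List Int) (n a : Nat) :
    ∀ l, wmaxF P D n a (l+1) = max (qF P D n a) (wmaxF P D n (a+1) l) := by
  intro l
  induction l generalizing a with
  | zero => simp [wmaxF]
  | succ l ih =>
    show max (wmaxF P D n a (l+1)) (qF P D n (a+(l+1)+1)) = _
    rw [ih a, max_assoc]
    congr 1
    show _ = wmaxF P D n (a+1) (l+1)
    rw [show wmaxF P D n (a+1) (l+1) = max (wmaxF P D n (a+1) l) (qF P D n ((a+1)+l+1)) from rfl]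
    congr 2
    omega

lemma wmax_split (P D : List Int) (n a l1 : Nat) :
    ∀ l2, wmaxF P D n a (l1+l2+1) = max (wmaxF P D n a l1) (wmaxF P D n (a+l1+1) l2) := by
  intro l2
  induction l2 with
  | zero => rfl
  | succ l2 ih =>
    show wmaxF P D n a ((l1+l2+1)+1) = _
    rw [show wmaxF P D n a ((l1+l2+1)+1) = max (wmaxF P D n a (l1+l2+1)) (qF P D n (a+(l1+l2+1)+1)) from rfl,
      ih, max_assoc]
    congr 1
    rw [show wmaxF P D n (a+l1+1) (l2+1) = max (wmaxF P D n (a+l1+1) l2) (qF P D n ((a+l1+1)+l2+1)) from rfl]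
    congr 2
    omega

lemma rmax_eq (P D : List Int) (n : Nat) :
    ∀ t, t < n → rmaxF P D n t = wmaxF P D n (n-1-t) t := by
  intro t
  induction t with
  | zero => intro _; rfl
  | succ t ih =>
    intro ht
    show max (qF P D n (n-2-t)) (rmaxF P D n t) = _
    rw [ih (by omega)]
    rw [show n-1-(t+1) = n-2-t by omega, wmax_cons]
    congr 2
    omega

lemma pmax_eq (P D : List Int) (n : Nat) :
    ∀ t, pmaxF P D n t = wmaxF P D n n t := by
  intro t
  induction t with
  | zero => rfl
  | succ t ih =>
    show max (qF P D n (n+1+t)) (pmaxF P D n t) = max (wmaxF P D n n t) (qF P D n (n+t+1))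
    rw [ih, max_comm]
    congr 2
    omega

lemma ans_eq (P D : List Int) (n : Nat) (hn : 0 < n) (s : Nat) (hs : s < n) :
    ansA P D n s = ansB P D n s := by
  unfold ansA ansB
  rw [add_comm]
  congr 1
  by_cases h0 : s = 0
  · subst h0
    rw [if_pos rfl, rmax_eq P D n (n-1) (by omega), show n-1-(n-1) = 0 by omega]
  · rw [if_neg h0, rmax_eq P D n (n-1-s) (by omega), pmax_eq P D n (s-1),
      show n-1-(n-1-s) = s by omega]
    have h := wmax_split P D n s (n-1-s) (s-1)
    rw [show n-1-s+(s-1)+1 = n-1 by omega] at h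
    rw [show s+(n-1-s)+1 = n by omega] at h
    exact h

lemma A_inner (P D : List Int) (n : Nat) (s : Nat) (hs : s < n) : ∀ i : Nat,
    (PySem.List.pyRange 0 (i : Int) 1).foldl
      (fun totalTime iv =>
        max (totalTime + PySem.List.pyGetD D (PySem.Int.mod ((s:Int) + iv) (n:Int)) 0)
          (PySem.List.pyGetD P (PySem.Int.mod (PySem.Int.mod ((s:Int) + iv) (n:Int) + 1) (n:Int)) 0))
      (P.getD s 0)
    = wmaxF P D n s i + prefF D n (s+i) := by
  intro i
  induction i with
  | zero =>
    rw [Nat.cast_zero, PySem.List.pyRange_one_eq_nil le_rfl, List.foldl_nil]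
    simp [wmaxF, qF, Nat.mod_eq_of_lt hs]
  | succ i ih =>
    rw [show ((i+1 : Nat) : Int) = (i:Int)+1 by push_cast; ring,
      PySem.List.pyRange_one_succ_right (Int.natCast_nonneg i),
      List.foldl_append, ih, List.foldl_cons, List.foldl_nil]
    have hm : PySem.Int.mod ((s:Int) + (i:Int)) (n:Int) = (((s+i) % n : Nat) : Int) := by
      rw [show ((s:Int)+(i:Int)) = ((s+i : Nat):Int) by push_cast; ring, PySem.Int.mod_natCast]
    have hm2 : PySem.Int.mod ((((s+i) % n : Nat):Int) + 1) (n:Int) = (((s+i+1) % n : Nat) : Int) := by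
      rw [show ((((s+i) % n : Nat):Int) + 1) = (((s+i) % n + 1 : Nat):Int) by push_cast; ring,
        PySem.Int.mod_natCast, Nat.mod_add_mod]
    rw [hm, hm2, PySem.List.pyGetD_natCast, PySem.List.pyGetD_natCast]
    rw [show wmaxF P D n s (i+1) = max (wmaxF P D n s i) (qF P D n (s+i+1)) from rfl]
    rw [show prefF D n (s+(i+1)) = prefF D n (s+i) + D.getD ((s+i) % n) 0 from rfl]
    rw [← max_add_add_right]
    congr 1
    · ring
    · show P.getD ((s+i+1) % n) 0 = qF P D n (s+i+1) + (prefF D n (s+i) + D.getD ((s+i) % n) 0)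
      rw [show prefF D n (s+i) + D.getD ((s+i) % n) 0 = prefF D n (s+i+1) from rfl]
      simp [qF]

lemma solveA_eq (P D : List Int) (n : Nat) (hn : 0 < n) :
    solve (n:Int) P D = (List.range n).foldl (fun b s => min b (ansA P D n s)) (10^8) := by
  show (PySem.List.pyRange 0 (n:Int) 1).foldl _ _ = _
  rw [show PySem.List.pyRange 0 (n:Int) 1 = (List.range n).map (fun (k : Nat) => ((0:Int) + (k:Int)))
      by rw [PySem.List.pyRange_one, show ((n:Int) - 0).toNat = n by omega]]
  rw [List.foldl_map]
  refine PySem.List.foldl_congr_mem _ _ _ _ (fun acc s hs => ?_)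
  rw [List.mem_range] at hs
  simp only [zero_add]
  rw [PySem.List.pyGetD_natCast, show ((n:Int) - 1) = ((n-1 : Nat) : Int) by omega,
    A_inner P D n s hs (n-1), show s+(n-1) = s+n-1 by omega]
  rfl

lemma pref_fold (D : List Int) (n : Nat) : ∀ m : Nat,
    ((PySem.List.pyRange 1 ((m:Int)+1) 1).foldl
      (fun pref k => pref ++ [PySem.List.pyGetD pref (-1) 0 + PySem.List.pyGetD D (PySem.Int.mod (k - 1) (n:Int)) 0]) [(0:Int)])
    = (List.range (m+1)).map (prefF D n) := by
  intro m
  induction m with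
  | zero =>
    rw [show ((0:Nat):Int)+1 = 1 by norm_num, PySem.List.pyRange_one_eq_nil le_rfl, List.foldl_nil]
    simp [prefF]
  | succ m ih =>
    rw [show (((m+1):Nat):Int)+1 = ((m:Int)+1)+1 by push_cast; ring,
      PySem.List.pyRange_one_succ_right (by omega : (1:Int) ≤ (m:Int)+1),
      List.foldl_append, ih, List.foldl_cons, List.foldl_nil]
    have hlast : PySem.List.pyGetD ((List.range (m+1)).map (prefF D n)) (-1) 0 = prefF D n m := by
      rw [List.range_succ, List.map_append, List.map_cons, List.map_nil,
        PySem.List.pyGetD_neg_one_append_singleton]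
    rw [hlast, show ((m:Int)+1)-1 = ((m:Nat):Int) by ring, PySem.Int.mod_natCast,
      PySem.List.pyGetD_natCast,
      show prefF D n m + D.getD (m % n) 0 = prefF D n (m+1) from rfl,
      show List.range (m+1+1) = List.range (m+1) ++ [m+1] from List.range_succ, List.map_append,
      List.map_cons, List.map_nil]

lemma q_map (P D : List Int) (n : Nat) :
    ((PySem.List.pyRange 0 (2*(n:Int)) 1).map
      (fun k => PySem.List.pyGetD P (PySem.Int.mod k (n:Int)) 0 - PySem.List.pyGetD ((List.range (2*n)).map (prefF D n)) k 0))
    = (List.range (2*n)).map (qF P D n) := by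
  rw [show PySem.List.pyRange 0 (2*(n:Int)) 1 = (List.range (2*n)).map (fun (k:Nat) => ((0:Int) + (k:Int)))
      by rw [PySem.List.pyRange_one, show ((2*(n:Int)) - 0).toNat = 2*n by omega]]
  rw [List.map_map]
  refine List.map_congr_left (fun k hk => ?_)
  rw [List.mem_range] at hk
  simp only [Function.comp, zero_add]
  rw [PySem.Int.mod_natCast, PySem.List.pyGetD_natCast, PySem.List.pyGetD_natCast,
    PySem.List.getD_map_range _ _ _ _ hk]
  rfl

lemma rs_fold (P D : List Int) (n : Nat) (hn : 0 < n) : ∀ t, t ≤ n-1 →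
    (((List.range t).map (fun (k:Nat) => ((n:Int) - 2) - (k:Int))).foldl
      (fun rs i => rs ++ [max (PySem.List.pyGetD ((List.range (2*n)).map (qF P D n)) i 0) (PySem.List.pyGetD rs (-1) 0)])
      [qF P D n (n-1)])
    = (List.range (t+1)).map (rmaxF P D n) := by
  intro t
  induction t with
  | zero => intro _; simp [rmaxF]
  | succ t ih =>
    intro ht
    rw [List.range_succ, List.map_append, List.map_cons, List.map_nil, List.foldl_append,
      ih (by omega), List.foldl_cons, List.foldl_nil]
    have hlast : PySem.List.pyGetD ((List.range (t+1)).map (rmaxF P D n)) (-1) 0 = rmaxF P D n t := by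
      rw [List.range_succ, List.map_append, List.map_cons, List.map_nil,
        PySem.List.pyGetD_neg_one_append_singleton]
    rw [hlast, show ((n:Int)-2) - (t:Int) = ((n-2-t : Nat):Int) by omega,
      PySem.List.pyGetD_natCast, PySem.List.getD_map_range _ _ _ _ (by omega : n-2-t < 2*n),
      show max (qF P D n (n-2-t)) (rmaxF P D n t) = rmaxF P D n (t+1) from rfl,
      show List.range (t+1+1) = List.range (t+1) ++ [t+1] from List.range_succ, List.map_append,
      List.map_cons, List.map_nil]

lemma pm_fold (P D : List Int) (n : Nat) (hn : 0 < n) : ∀ t, t ≤ n-1 →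
    (((List.range t).map (fun (k:Nat) => ((n:Int) + 1) + (k:Int))).foldl
      (fun pm j => pm ++ [max (PySem.List.pyGetD ((List.range (2*n)).map (qF P D n)) j 0) (PySem.List.pyGetD pm (-1) 0)])
      [qF P D n n])
    = (List.range (t+1)).map (pmaxF P D n) := by
  intro t
  induction t with
  | zero => intro _; simp [pmaxF]
  | succ t ih =>
    intro ht
    rw [List.range_succ, List.map_append, List.map_cons, List.map_nil, List.foldl_append,
      ih (by omega), List.foldl_cons, List.foldl_nil]
    have hlast : PySem.List.pyGetD ((List.range (t+1)).map (pmaxF P D n)) (-1) 0 = pmaxF P D n t := by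
      rw [List.range_succ, List.map_append, List.map_cons, List.map_nil,
        PySem.List.pyGetD_neg_one_append_singleton]
    rw [hlast, show ((n:Int)+1) + (t:Int) = ((n+1+t : Nat):Int) by push_cast; ring,
      PySem.List.pyGetD_natCast, PySem.List.getD_map_range _ _ _ _ (by omega : n+1+t < 2*n),
      show max (qF P D n (n+1+t)) (pmaxF P D n t) = pmaxF P D n (t+1) from rfl,
      show List.range (t+1+1) = List.range (t+1) ++ [t+1] from List.range_succ, List.map_append,
      List.map_cons, List.map_nil]

lemma solveB_eq (P D : List Int) (n : Nat) (hn : 0 < n) :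
    solve_alt (n:Int) P D = (List.range n).foldl (fun b s => min b (ansB P D n s)) (10^8) := by
  simp only [solve_alt]
  rw [if_neg (by omega : ¬ (n:Int) ≤ 0)]
  have hpref := pref_fold D n (2*n-1)
  rw [show (((2*n-1 : Nat)):Int)+1 = 2*(n:Int) by omega, show 2*n-1+1 = 2*n by omega] at hpref
  rw [hpref, q_map P D n]
  rw [PySem.List.pyRange_neg_one, show ((n:Int)-2-(-1)).toNat = n-1 by omega,
    show ((n:Int)-1) = ((n-1:Nat):Int) by omega, PySem.List.pyGetD_natCast,
    PySem.List.getD_map_range _ _ _ _ (by omega : n-1 < 2*n),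
    rs_fold P D n hn (n-1) le_rfl, show n-1+1 = n by omega]
  rw [show PySem.List.pyRange ((n:Int)+1) (2*(n:Int)) 1
        = (List.range (n-1)).map (fun (k:Nat) => ((n:Int)+1) + (k:Int))
      by rw [PySem.List.pyRange_one, show (2*(n:Int) - ((n:Int)+1)).toNat = n-1 by omega],
    PySem.List.pyGetD_natCast,
    PySem.List.getD_map_range _ _ _ _ (by omega : n < 2*n),
    pm_fold P D n hn (n-1) le_rfl, show n-1+1 = n by omega]
  rw [show PySem.List.pyRange 0 (n:Int) 1 = (List.range n).map (fun (k:Nat) => ((0:Int) + (k:Int)))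
      by rw [PySem.List.pyRange_one, show ((n:Int) - 0).toNat = n by omega]]
  rw [List.foldl_map]
  refine PySem.List.foldl_congr_mem _ _ _ _ (fun acc s hsmem => ?_)
  rw [List.mem_range] at hsmem
  simp only [zero_add]
  rw [show (s:Int)+(n:Int)-1 = ((s+n-1:Nat):Int) by omega, PySem.List.pyGetD_natCast,
    PySem.List.getD_map_range _ _ _ _ (by omega : s+n-1 < 2*n),
    show ((n-1:Nat):Int)-(s:Int) = ((n-1-s:Nat):Int) by omega, PySem.List.pyGetD_natCast,
    PySem.List.getD_map_range _ _ _ _ (by omega : n-1-s < n)]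
  by_cases hs0 : s = 0
  · rw [if_pos (by exact_mod_cast hs0 : (s:Int) = 0)]
    subst hs0
    simp [ansB]
  · rw [if_neg (by exact_mod_cast hs0 : ¬ (s:Int) = 0),
      show (s:Int)-1 = ((s-1:Nat):Int) by omega, PySem.List.pyGetD_natCast,
      PySem.List.getD_map_range _ _ _ _ (by omega : s-1 < n)]
    simp only [ansB, if_neg hs0]

-- ===== VERDICT (by name: the statement is the Claim_ definition above) =====
theorem solve_spec : Claim_equal_solve := by
  intro N P D _ _
  show solve N P D = solve_alt N P D
  by_cases hN : N ≤ 0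
  · rw [solve, solve_alt, if_pos hN, PySem.List.pyRange_one_eq_nil hN]; rfl
  · have hN : 0 < N := by omega
    obtain ⟨n, rfl⟩ : ∃ n : Nat, N = (n:Int) := ⟨N.toNat, (Int.toNat_of_nonneg (by omega)).symm⟩
    have hn : 0 < n := by exact_mod_cast hN
    rw [solveA_eq P D n hn, solveB_eq P D n hn]
    exact PySem.List.foldl_congr_mem _ _ _ _ (fun acc s hs => by
      rw [ans_eq P D n hn s (List.mem_range.mp hs)])
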